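-- pv_equiv track=rewrite | github.com/wubo0067/ai-app-hub | vmcore-analysis-agent/src/mcp_tools/stack_canary/analyzer.py | _find_return_address_location
-- ===== SOURCE A (Python) =====
-- from typing import Optional
--
-- def _find_return_address_location(
--     stack_words: dict[int, int], target: int, stack_chk_fail_frame_addr: int
-- ) -> Optional[int]:
--     matches = sorted(addr for addr, value in stack_words.items() if value == target)
--     if not matches:
--         return None
--     eligible = [addr for addr in matches if addr >= stack_chk_fail_frame_addr]
--     return eligible[0] if eligible else matches[0]
-- ===== SOURCE B (Python) =====
-- from typing import Optional
--
--
-- def _upd(best: Optional[int], addr: int) -> int: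
--     if best is None or addr < best:
--         return addr
--     return best
--
--
-- def _find_return_address_location(
--     stack_words: dict[int, int], target: int, stack_chk_fail_frame_addr: int
-- ) -> Optional[int]:
--     best_any = None
--     best_elig = None
--     for addr, value in stack_words.items():
--         if value == target:
--             best_any = _upd(best_any, addr)
--             if addr >= stack_chk_fail_frame_addr:
--                 best_elig = _upd(best_elig, addr)
--     return best_any if best_elig is None else best_elig
-- ===== Notes on version B (the rewrite author's own statement) =====
-- stated objective: alternative
-- what changed: Replaces A's sort of all matches plus a separate eligible sublist and an if/else branch with one linear pass over the dict that maintains two running minima (overall and >= threshold) and picks the eligible one if it exists.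
import Mathlib
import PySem

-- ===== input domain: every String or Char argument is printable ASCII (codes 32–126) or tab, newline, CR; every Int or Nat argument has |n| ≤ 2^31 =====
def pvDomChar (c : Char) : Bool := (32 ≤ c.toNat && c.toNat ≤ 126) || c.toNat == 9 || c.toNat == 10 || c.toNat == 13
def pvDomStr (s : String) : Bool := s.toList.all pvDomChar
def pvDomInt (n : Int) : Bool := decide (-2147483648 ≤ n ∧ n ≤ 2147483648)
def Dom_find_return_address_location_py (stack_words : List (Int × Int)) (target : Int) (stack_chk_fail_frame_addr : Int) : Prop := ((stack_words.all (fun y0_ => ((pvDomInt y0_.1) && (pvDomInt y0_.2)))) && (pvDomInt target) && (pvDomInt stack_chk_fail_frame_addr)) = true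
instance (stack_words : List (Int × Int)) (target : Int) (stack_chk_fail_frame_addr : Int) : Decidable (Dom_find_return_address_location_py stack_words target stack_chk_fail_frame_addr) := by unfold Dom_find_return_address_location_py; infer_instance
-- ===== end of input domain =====

-- B replaces A's sort + eligible-sublist + branch with one linear pass keeping two
-- running minima (overall, and ≥ threshold); return values are identical (alternative).

-- ===== PORT A =====
-- matches = sorted(addr for addr, value in stack_words.items() if value == target)
-- if not matches: return None
-- eligible = [addr for addr in matches if addr >= stack_chk_fail_frame_addr]
-- return eligible[0] if eligible else matches[0]
def find_return_address_location_py (stack_words : List (Int × Int)) (target : Int) (stack_chk_fail_frame_addr : Int) : Option Int :=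
  let matches_ := PySem.List.sorted ((stack_words.filter (fun p => p.2 == target)).map Prod.fst) (fun x => x) false
  match matches_ with
  | [] => none
  | m :: _ =>
    let eligible := matches_.filter (fun addr => decide (addr ≥ stack_chk_fail_frame_addr))
    match eligible with
    | e :: _ => some e
    | [] => some m

-- ===== PORT B =====
-- helper _upd(best, addr): running minimum over an Optional accumulator
def pvUpd (best : Option Int) (addr : Int) : Option Int :=
  match best with
  | none => some addr
  | some b => if addr < b then some addr else some b

-- best_any/best_elig accumulated in one pass over the items; eligible one wins
def find_return_address_location_py_alt (stack_words : List (Int × Int)) (target : Int) (stack_chk_fail_frame_addr : Int) : Option Int :=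
  let s := stack_words.foldl
    (fun (s : Option Int × Option Int) p =>
      if p.2 == target then
        (pvUpd s.1 p.1,
         if decide (p.1 ≥ stack_chk_fail_frame_addr) then pvUpd s.2 p.1 else s.2)
      else s)
    (none, none)
  match s.2 with
  | none => s.1
  | some e => some e

-- ===== PRECONDITION & SPEC =====
def Spec_find_return_address_location_py (stack_words : List (Int × Int)) (target : Int) (stack_chk_fail_frame_addr : Int) (out : Option Int) : Prop := out = find_return_address_location_py_alt stack_words target stack_chk_fail_frame_addr
instance (stack_words : List (Int × Int)) (target : Int) (stack_chk_fail_frame_addr : Int) (out : Option Int) : Decidable (Spec_find_return_address_location_py stack_words target stack_chk_fail_frame_addr out) := by unfold Spec_find_return_address_location_py; infer_instance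

-- ===== CLAIM =====
def Claim_equal_find_return_address_location_py : Prop := ∀ (stack_words : List (Int × Int)) (target : Int) (stack_chk_fail_frame_addr : Int), Dom_find_return_address_location_py stack_words target stack_chk_fail_frame_addr → Spec_find_return_address_location_py stack_words target stack_chk_fail_frame_addr (find_return_address_location_py stack_words target stack_chk_fail_frame_addr)

-- ===== LEMMAS AND PROOFS =====

-- B's paired fold splits into two independent pvUpd folds over the candidate list
lemma pvFold_split (t c : Int) :
    ∀ (sw : List (Int × Int)) (a b : Option Int),
      sw.foldl
        (fun (s : Option Int × Option Int) p =>
          if p.2 == t then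
            (pvUpd s.1 p.1, if decide (p.1 ≥ c) then pvUpd s.2 p.1 else s.2)
          else s)
        (a, b)
      = (((sw.filter (fun p => p.2 == t)).map Prod.fst).foldl pvUpd a,
         ((((sw.filter (fun p => p.2 == t)).map Prod.fst).filter (fun x => decide (x ≥ c))).foldl pvUpd b)) := by
  intro sw
  induction sw with
  | nil => intro a b; rfl
  | cons p tl ih =>
      intro a b
      rw [List.foldl_cons]
      by_cases hp : (p.2 == t) = true
      · rw [if_pos hp]
        by_cases hc : decide (p.1 ≥ c) = true
        · rw [if_pos hc, ih]
          simp [hp, hc]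
        · rw [if_neg hc, ih]
          simp [hp, hc]
      · rw [if_neg hp, ih]
        simp [hp]

-- the pvUpd fold from a seed returns the minimum of seed-and-list
lemma pvUpd_fold_min :
    ∀ (L : List Int) (m : Int),
      ∃ r, L.foldl pvUpd (some m) = some r ∧ r ∈ m :: L ∧ ∀ y ∈ m :: L, r ≤ y := by
  intro L
  induction L with
  | nil => intro m; exact ⟨m, rfl, by simp, by simp⟩
  | cons x tl ih =>
      intro m
      simp only [List.foldl_cons]
      by_cases hx : x < m
      · obtain ⟨r, hr, hmem, hall⟩ := ih x
        refine ⟨r, by simpa [pvUpd, hx] using hr, ?_, ?_⟩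
        · rcases List.mem_cons.mp hmem with rfl | h
          · exact List.mem_cons.mpr (Or.inr List.mem_cons_self)
          · exact List.mem_cons.mpr (Or.inr (List.mem_cons.mpr (Or.inr h)))
        · intro y hy
          rcases List.mem_cons.mp hy with rfl | hy'
          · have h1 := hall x List.mem_cons_self; omega
          · exact hall y hy'
      · obtain ⟨r, hr, hmem, hall⟩ := ih m
        refine ⟨r, by simpa [pvUpd, hx] using hr, ?_, ?_⟩
        · rcases List.mem_cons.mp hmem with rfl | h
          · exact List.mem_cons_self
          · exact List.mem_cons.mpr (Or.inr (List.mem_cons.mpr (Or.inr h)))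
        · intro y hy
          rcases List.mem_cons.mp hy with rfl | hy'
          · exact hall y List.mem_cons_self
          · rcases List.mem_cons.mp hy' with rfl | hy''
            · have h1 := hall m List.mem_cons_self; omega
            · exact hall y (List.mem_cons.mpr (Or.inr hy''))

lemma pvMin_unique {L : List Int} {r s : Int}
    (hr : r ∈ L) (hrl : ∀ y ∈ L, r ≤ y) (hs : s ∈ L) (hsl : ∀ y ∈ L, s ≤ y) : r = s :=
  le_antisymm (hrl s hs) (hsl r hr)

-- head of a pairwise-≤ nonempty list is a minimum
lemma pvHead_min {m : Int} {tl : List Int}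
    (hpw : (m :: tl).Pairwise (fun a b => (a : Int) ≤ b)) :
    ∀ y ∈ m :: tl, m ≤ y := by
  intro y hy
  rcases List.mem_cons.mp hy with rfl | hy'
  · exact le_refl y
  · exact (List.pairwise_cons.mp hpw).1 y hy'

-- core equivalence over the candidate list C
lemma pvMain (C : List Int) (c : Int) :
    (match PySem.List.sorted C (fun x => x) false with
     | [] => none
     | m :: _ =>
       match (PySem.List.sorted C (fun x => x) false).filter (fun addr => decide (addr ≥ c)) with
       | e :: _ => some e
       | [] => some m)
    = (match (C.filter (fun x => decide (x ≥ c))).foldl pvUpd none with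
       | none => C.foldl pvUpd none
       | some e => some e) := by
  have hperm : (PySem.List.sorted C (fun x => x) false).Perm C := PySem.List.sorted_perm C _ _
  match hM : PySem.List.sorted C (fun x => x) false with
  | [] =>
      rw [hM] at hperm
      have hc : C = [] := (List.Perm.nil_eq hperm).symm
      simp [hc]
  | m :: tl =>
      rw [hM] at hperm
      have hpw : (m :: tl).Pairwise (fun a b => (a : Int) ≤ b) := by
        have h2 := PySem.List.sorted_pairwise (κ := Int) C (fun x => x)
        rw [hM] at h2; exact h2
      have hpermF : ((m :: tl).filter (fun x => decide (x ≥ c))).Perm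
          (C.filter (fun x => decide (x ≥ c))) := hperm.filter _
      match hCm : C with
      | [] => exact absurd hperm.length_eq (by simp)
      | x :: ctl =>
        match hE : (m :: tl).filter (fun x => decide (x ≥ c)) with
        | e :: etl =>
            -- eligible nonempty: A returns e = min of the eligible; so does B's fold
            rw [hE] at hpermF
            match hF : (x :: ctl).filter (fun y => decide (y ≥ c)) with
            | [] => rw [hF] at hpermF; exact absurd hpermF.length_eq (by simp)
            | f :: ftl =>
                rw [hF] at hpermF
                simp only [List.foldl_cons, pvUpd]
                obtain ⟨r, hr, hmem, hall⟩ := pvUpd_fold_min ftl f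
                rw [hr]
                have hpwE : (e :: etl).Pairwise (fun a b => (a : Int) ≤ b) := by
                  rw [← hE]; exact hpw.filter _
                have heminE : ∀ y ∈ e :: etl, e ≤ y := pvHead_min hpwE
                have hre : r = e := by
                  refine pvMin_unique (L := e :: etl) ?_ ?_ (by simp) heminE
                  · exact hpermF.mem_iff.mpr hmem
                  · intro y hy; exact hall y (hpermF.mem_iff.mp hy)
                rw [hre]
        | [] =>
            -- no eligible address: both return the overall minimum
            rw [hE] at hpermF
            have hF : (x :: ctl).filter (fun y => decide (y ≥ c)) = [] :=
              (List.Perm.nil_eq hpermF).symm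
            rw [hF]
            simp only [List.foldl_nil, List.foldl_cons, pvUpd]
            obtain ⟨r, hr, hmem, hall⟩ := pvUpd_fold_min ctl x
            rw [hr]
            have hmmin : ∀ y ∈ m :: tl, m ≤ y := pvHead_min hpw
            have : m = r := by
              refine pvMin_unique (L := x :: ctl) (hperm.mem_iff.mp (by simp)) ?_ hmem hall
              · intro y hy; exact hmmin y (hperm.mem_iff.mpr hy)
            rw [this]

-- ===== VERDICT =====
theorem find_return_address_location_py_spec : Claim_equal_find_return_address_location_py := by
  intro sw t c _
  unfold Spec_find_return_address_location_py
  unfold find_return_address_location_py_alt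
  rw [pvFold_split t c sw none none]
  exact pvMain ((sw.filter (fun p => p.2 == t)).map Prod.fst) c
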